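-- pv_equiv track=rewrite | github.com/sokrypton/ColabFold | colabfold/msa2json.py | split_a3msequences
-- ===== SOURCE A (Python) =====
-- def split_a3msequences(residue_lens, line) -> list[str]:
--     """Split a3m sequences into a list of a3m sequences.
--     Note: The a3m-format MSA file represents inserted residues with lowercase.
--     The first line (starting with '#') of the MSA file contains residue lengths
--     and stoichiometries of each polypeptide chain.
--     From the second line, the first sequence is the query.
--     After this, the paired MSA blocks are followed by the unpaired MSA.
--     Args:
--         residue_lens: list[int]
--             Residue lengths of each polypeptide chain
--         line: str
--             A3M sequences
--     Returns:
--         a3msequences: list[str]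
--             A3M sequences, len(a3msequences) should be the same as len(residue_lens).
--     """
--     a3msequences = [""] * len(residue_lens)
--     i = 0
--     count = 0
--     current_residue = []
--
--     for char in line:
--         current_residue.append(char)
--         if char == "-" or char.isupper():
--             count += 1
--         if count == residue_lens[i]:
--             a3msequences[i] = "".join(current_residue)
--             current_residue = []
--             count = 0
--             i += 1
--             if i == len(residue_lens):
--                 break
--
--     if current_residue and i < len(residue_lens):
--         a3msequences[i] = "".join(current_residue)
--
--     return a3msequences
-- ===== SOURCE B (Python) =====
-- def take_chain(target, s):
--     """Consume the shortest prefix of s after which the running count of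
--     '-'/uppercase chars equals target; return (prefix, rest, True), or
--     (s, '', False) if the count never hits target."""
--     count = 0
--     for j, ch in enumerate(s):
--         if ch == "-" or ch.isupper():
--             count += 1
--         if count == target:
--             return s[: j + 1], s[j + 1 :], True
--     return s, "", False
--
--
-- def split_a3msequences(residue_lens, line) -> list[str]:
--     a3msequences = [""] * len(residue_lens)
--     rest = line
--     for k, target in enumerate(residue_lens):
--         seg, rest, complete = take_chain(target, rest)
--         a3msequences[k] = seg
--         if not complete:
--             break
--     return a3msequences
-- ===== Notes on version B (the rewrite author's own statement) =====
-- stated objective: simpler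
-- what changed: Replaces A's single flat loop over a mutable (buffer, count, chain-index) state with a per-chain decomposition: a helper take_chain consumes one chain's prefix and the main function iterates chain by chain on the remaining string.
import Mathlib
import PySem

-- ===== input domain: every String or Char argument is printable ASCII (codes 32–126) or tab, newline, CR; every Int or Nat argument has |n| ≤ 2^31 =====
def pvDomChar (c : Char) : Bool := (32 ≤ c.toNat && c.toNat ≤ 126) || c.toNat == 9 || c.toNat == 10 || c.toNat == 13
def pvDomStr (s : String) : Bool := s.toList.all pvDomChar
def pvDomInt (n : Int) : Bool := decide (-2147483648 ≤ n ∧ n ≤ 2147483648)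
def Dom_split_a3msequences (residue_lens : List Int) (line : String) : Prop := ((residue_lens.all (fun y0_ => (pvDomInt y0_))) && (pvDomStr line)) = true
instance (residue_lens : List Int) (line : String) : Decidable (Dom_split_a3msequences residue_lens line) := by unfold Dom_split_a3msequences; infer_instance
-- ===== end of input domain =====

-- B replaces A's flat loop over one mutable (buffer, count, index) state by a
-- per-chain decomposition: a helper consumes one chain's prefix, the main
-- function recurses chain by chain (objective: simpler; same O(n) cost).

-- ===== PORT A =====
-- One step per character, carrying (accumulator list, chain index i, count, buffer),
-- exactly as A's for-loop does; `buf` is A's current_residue (joined by String.ofList).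
def pvLoopA (rl : List Int) : List Char → List String → Nat → Int → List Char → List String
  | [], acc, i, _, buf =>
      -- after the for-loop: `if current_residue and i < len(residue_lens)`
      if buf ≠ [] ∧ i < rl.length then acc.set i (String.ofList buf) else acc
  | c :: cs, acc, i, count, buf =>
      let buf := buf ++ [c]
      let count := if c == '-' || c.isUpper then count + 1 else count
      match rl[i]? with
      | none => acc   -- Python raises IndexError here (only rl = [], excluded by Pre_)
      | some t =>
        if count == t then
          let acc := acc.set i (String.ofList buf)
          if i + 1 == rl.length then acc   -- `break`
          else pvLoopA rl cs acc (i + 1) 0 []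
        else pvLoopA rl cs acc i count buf

def split_a3msequences (residue_lens : List Int) (line : String) : List String :=
  pvLoopA residue_lens line.toList (List.replicate residue_lens.length "") 0 0 []

-- ===== PORT B =====
-- take_chain: shortest prefix after which the running '-'/uppercase count hits
-- target; (prefix, rest, true), or (whole input, [], false) if it never does.
def pvTakeChain (target : Int) (count : Int) : List Char → List Char × List Char × Bool
  | [] => ([], [], false)
  | c :: cs =>
      let count := if c == '-' || c.isUpper then count + 1 else count
      if count == target then ([c], cs, true)
      else
        let (seg, r, b) := pvTakeChain target count cs
        (c :: seg, r, b)

-- chain-by-chain recursion (B builds the result list front to back; the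
-- remaining chains stay "" after an incomplete chain, as B's `break` leaves them)
def pvSplitB : List Int → List Char → List String
  | [], _ => []
  | t :: ts, rest =>
      match pvTakeChain t 0 rest with
      | (seg, r, true) => String.ofList seg :: pvSplitB ts r
      | (seg, _, false) => String.ofList seg :: List.replicate ts.length ""

def split_a3msequences_alt (residue_lens : List Int) (line : String) : List String :=
  pvSplitB residue_lens line.toList

-- ===== PRECONDITION & SPEC =====
-- Pre_ excludes exactly the inputs where A raises IndexError:
-- an empty residue_lens with a non-empty line.
def Pre_split_a3msequences (residue_lens : List Int) (line : String) : Prop :=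
  residue_lens ≠ [] ∨ line = ""
instance (residue_lens : List Int) (line : String) : Decidable (Pre_split_a3msequences residue_lens line) := by unfold Pre_split_a3msequences; infer_instance

def pvWitness_split_a3msequences : List Int × String := ([1], "A")

def Spec_split_a3msequences (residue_lens : List Int) (line : String) (out : List String) : Prop := out = split_a3msequences_alt residue_lens line
instance (residue_lens : List Int) (line : String) (out : List String) : Decidable (Spec_split_a3msequences residue_lens line out) := by unfold Spec_split_a3msequences; infer_instance

-- ===== CLAIM (what is proved, stated in full; the proofs are below) =====
def Claim_equal_split_a3msequences : Prop := ∀ (residue_lens : List Int) (line : String), Dom_split_a3msequences residue_lens line → Pre_split_a3msequences residue_lens line → Spec_split_a3msequences residue_lens line (split_a3msequences residue_lens line)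

-- ===== LEMMAS AND PROOFS =====

-- mid-chain continuation of B: chain `t` already has `count` counted and the
-- characters `buf` consumed; used only to state the loop invariant for A.
def pvChainStep : List Int → Int → List Char → List Char → List String
  | [], _, _, _ => []
  | t :: ts, count, buf, cs =>
      match pvTakeChain t count cs with
      | (seg, r, true) => String.ofList (buf ++ seg) :: pvSplitB ts r
      | (seg, _, false) => String.ofList (buf ++ seg) :: List.replicate ts.length ""

theorem pvChainStep_start (rl : List Int) (cs : List Char) (h : rl ≠ []) :
    pvChainStep rl 0 [] cs = pvSplitB rl cs := by
  cases rl with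
  | nil => exact absurd rfl h
  | cons t ts =>
    simp only [pvChainStep, pvSplitB]
    rcases hp : pvTakeChain t 0 cs with ⟨seg, r, b⟩
    cases b <;> simp

-- set at index pre.length on pre ++ "" :: tail
theorem pvSet_mid (pre : List String) (k : Nat) (x : String) :
    (pre ++ List.replicate (k + 1) "").set pre.length x
      = pre ++ x :: List.replicate k "" := by
  rw [List.set_append_right _ _ (le_refl _)]
  simp [List.replicate_succ]

-- the empty-input case of the invariant (A's after-loop leftover assignment)
theorem pvBase (rl : List Int) (i : Nat) (count : Int) (buf : List Char) (pre : List String)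
    (hpre : pre.length = i) (hi : i < rl.length) :
    pvLoopA rl [] (pre ++ List.replicate (rl.length - i) "") i count buf
      = pre ++ pvChainStep (rl.drop i) count buf [] := by
  rcases hd : rl.drop i with _ | ⟨t, ts⟩
  · exact absurd hd (by simp [List.drop_eq_nil_iff]; omega)
  · have hts : rl.length - i = ts.length + 1 := by
      have := congrArg List.length hd; simp at this; omega
    simp only [pvLoopA, pvChainStep, pvTakeChain]
    by_cases hb : buf = []
    · simp [hb, hts, List.replicate_succ]
    · rw [if_pos ⟨hb, hi⟩, hts, ← hpre, pvSet_mid]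
      simp

-- main invariant: A's loop from a mid-chain state equals pre ++ B's continuation
theorem pvMain : ∀ (n : Nat) (cs : List Char), cs.length ≤ n →
    ∀ (rl : List Int) (i : Nat) (count : Int) (buf : List Char) (pre : List String),
    pre.length = i → i < rl.length →
    pvLoopA rl cs (pre ++ List.replicate (rl.length - i) "") i count buf
      = pre ++ pvChainStep (rl.drop i) count buf cs := by
  intro n
  induction n with
  | zero =>
    intro cs hcs rl i count buf pre hpre hi
    have : cs = [] := List.eq_nil_of_length_eq_zero (Nat.le_zero.mp hcs)
    subst this
    exact pvBase rl i count buf pre hpre hi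
  | succ m ih =>
    intro cs hcs rl i count buf pre hpre hi
    cases cs with
    | nil =>
      exact pvBase rl i count buf pre hpre hi
    | cons c cs =>
      rcases hd : rl.drop i with _ | ⟨t, ts⟩
      · exact absurd hd (by simp [List.drop_eq_nil_iff]; omega)
      · have hts : rl.length - i = ts.length + 1 := by
          have := congrArg List.length hd; simp at this; omega
        have hget : rl[i]? = some t := by
          have : rl[i]? = (rl.drop i)[0]? := by simp
          rw [this, hd]; rfl
        simp only [pvLoopA, hget, pvChainStep, pvTakeChain]
        set count' := if c == '-' || c.isUpper then count + 1 else count with hc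
        by_cases he : count' == t
        · simp only [he, if_pos]
          have hset : (pre ++ List.replicate (rl.length - i) "").set i (String.ofList (buf ++ [c]))
              = (pre ++ [String.ofList (buf ++ [c])]) ++ List.replicate ts.length "" := by
            rw [hts, ← hpre, pvSet_mid]; simp
          by_cases hend : i + 1 = rl.length
          · have hts0 : ts = [] := by
              have := congrArg List.length hd; simp at this
              exact List.eq_nil_of_length_eq_zero (by omega)
            simp only [hend, beq_self_eq_true, if_pos, hset, hts0, pvSplitB]
            simp
          · have hbeq : (i + 1 == rl.length) = false := by
              simp [hend]
            simp only [hbeq, Bool.false_eq_true, if_false, hset]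
            have hd' : rl.drop (i + 1) = ts := by
              have : rl.drop (i+1) = (rl.drop i).drop 1 := by
                rw [List.drop_drop]
              rw [this, hd]; rfl
            have hi' : i + 1 < rl.length := by omega
            have := ih cs (by simp only [List.length_cons] at hcs; omega) rl (i+1) 0 []
              (pre ++ [String.ofList (buf ++ [c])]) (by simp [hpre]) hi'
            rw [hts] at hset
            rw [show rl.length - (i+1) = ts.length by omega] at this
            rw [this, hd', pvChainStep_start]
            · simp
            · intro h; rw [h] at hd'; simp at hd'
              have := congrArg List.length hd; simp at this; omega
        · simp only [he, Bool.false_eq_true, if_false]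
          rcases hp : pvTakeChain t count' cs with ⟨seg, r, b⟩
          have := ih cs (by simp only [List.length_cons] at hcs; omega) rl i count' (buf ++ [c]) pre hpre hi
          rw [this, hd, pvChainStep, hp]
          cases b <;> simp

-- ===== VERDICT (by name: the statement is the Claim_ definition above) =====
theorem split_a3msequences_spec : Claim_equal_split_a3msequences := by
  intro rl line _ hpre
  unfold Spec_split_a3msequences split_a3msequences split_a3msequences_alt
  cases rl with
  | nil =>
    rcases hpre with h | h
    · exact absurd rfl h
    · subst h; rfl
  | cons t ts =>
    have h := pvMain (line.toList.length) line.toList (le_refl _) (t :: ts) 0 0 [] []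
      rfl (by simp)
    simp only [List.drop_zero, List.nil_append, Nat.sub_zero] at h
    rw [h, pvChainStep_start]
    simp
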